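-- pv_equiv track=rewrite | github.com/subhk/VortexMethod.jl | python/v4/remeshing_3d_orig.py | _rearranging_boundary_node_list_
-- ===== SOURCE A (Python) =====
-- def _rearranging_boundary_node_list_(node_lt, node_rt, node_dn, node_up, delete_node):
--
-- 	for jtr in range( len(delete_node) ):
--
-- 		for itr in range( len(node_lt) ):
-- 			if node_lt[itr] > delete_node[jtr]: node_lt[itr] -= 1
--
-- 		for itr in range( len(node_rt) ):
-- 			if node_rt[itr] > delete_node[jtr]: node_rt[itr] -= 1
--
-- 		for itr in range( len(node_dn) ):
-- 			if node_dn[itr] > delete_node[jtr]: node_dn[itr] -= 1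
--
-- 		for itr in range( len(node_up) ):
-- 			if node_up[itr] > delete_node[jtr]: node_up[itr] -= 1
--
-- 	return node_lt, node_rt, node_dn, node_up
-- ===== SOURCE B (Python) =====
-- # B: compose all deletions into one strictly increasing threshold list, then
-- # renumber each node in a single pass (final value of x is x minus the number
-- # of thresholds below x).  Like A, it mutates the four node lists in place.
-- def _rearranging_boundary_node_list_(node_lt, node_rt, node_dn, node_up, delete_node):
--     th = []  # strictly increasing thresholds
--     for d in delete_node:
--         t = d
--         for s in th:
--             if s <= t:
--                 t += 1
--             else:
--                 break
--         # insert t into th keeping it sorted (binary search for position)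
--         lo, hi = 0, len(th)
--         while lo < hi:
--             mid = (lo + hi) // 2
--             if th[mid] < t:
--                 lo = mid + 1
--             else:
--                 hi = mid
--         th.insert(lo, t)
--
--     def final(x):
--         lo, hi = 0, len(th)
--         while lo < hi:
--             mid = (lo + hi) // 2
--             if th[mid] < x:
--                 lo = mid + 1
--             else:
--                 hi = mid
--         return x - lo
--
--     node_lt[:] = [final(x) for x in node_lt]
--     node_rt[:] = [final(x) for x in node_rt]
--     node_dn[:] = [final(x) for x in node_dn]
--     node_up[:] = [final(x) for x in node_up]
--     return node_lt, node_rt, node_dn, node_up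
-- ===== Notes on version B (the rewrite author's own statement) =====
-- stated objective: faster
-- what changed: Instead of sweeping all four lists once per deleted node, B composes all deletions into a single strictly increasing threshold list (built incrementally with an early-exit scan and sorted insertion) and then renumbers each node in one pass with a binary search over the thresholds.
import Mathlib
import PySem

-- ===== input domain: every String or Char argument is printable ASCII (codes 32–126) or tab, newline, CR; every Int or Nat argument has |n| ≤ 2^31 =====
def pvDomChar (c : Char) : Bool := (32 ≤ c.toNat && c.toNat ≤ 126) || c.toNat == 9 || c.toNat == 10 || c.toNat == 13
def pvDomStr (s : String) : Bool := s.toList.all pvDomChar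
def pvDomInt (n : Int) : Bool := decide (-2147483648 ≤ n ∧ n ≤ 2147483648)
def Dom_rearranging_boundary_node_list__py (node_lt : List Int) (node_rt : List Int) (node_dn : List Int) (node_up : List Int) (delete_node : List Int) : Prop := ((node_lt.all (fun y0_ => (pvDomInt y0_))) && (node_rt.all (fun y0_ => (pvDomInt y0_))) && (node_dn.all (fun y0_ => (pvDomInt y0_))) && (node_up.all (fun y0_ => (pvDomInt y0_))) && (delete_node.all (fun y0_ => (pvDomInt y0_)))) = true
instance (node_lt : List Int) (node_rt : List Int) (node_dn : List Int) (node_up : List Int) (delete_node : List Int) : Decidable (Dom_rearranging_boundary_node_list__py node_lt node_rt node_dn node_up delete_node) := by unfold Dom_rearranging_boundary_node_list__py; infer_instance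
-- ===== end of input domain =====

-- B composes all deletions into one strictly increasing threshold list and renumbers
-- each node with one binary search; equivalence is about the RETURN value (A mutates
-- the four node lists in place; the Python B performs the same final mutation).

-- ===== PORT A =====
-- A: for each delete value, one conditional-decrement pass over each of the four lists.
def rearranging_boundary_node_list__py (node_lt : List Int) (node_rt : List Int) (node_dn : List Int) (node_up : List Int) (delete_node : List Int) : List Int × List Int × List Int × List Int :=
  delete_node.foldl
    (fun st d =>
      (st.1.map (fun v => if v > d then v - 1 else v),
       st.2.1.map (fun v => if v > d then v - 1 else v),
       st.2.2.1.map (fun v => if v > d then v - 1 else v),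
       st.2.2.2.map (fun v => if v > d then v - 1 else v)))
    (node_lt, node_rt, node_dn, node_up)

-- ===== PORT B =====
-- the inner early-exit scan of Source B: slide t past the thresholds it absorbs
def insertT : List Int → Int → Int
  | [], d => d
  | s :: ss, d => if s ≤ d then insertT ss (d + 1) else d

-- Source B's binary search: first index in th[lo:hi] whose value is ≥ x
-- (the while loop runs structurally on the fuel hi - lo, which bounds its iterations)
def bsGo (th : List Int) (x : Int) : Nat → Nat → Nat → Nat
  | 0, lo, _ => lo
  | fuel + 1, lo, hi =>
    if lo < hi then
      let mid := (lo + hi) / 2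
      if th.getD mid 0 < x then bsGo th x fuel (mid + 1) hi else bsGo th x fuel lo mid
    else lo

def bs (th : List Int) (x : Int) (lo hi : Nat) : Nat := bsGo th x (hi - lo) lo hi

def rearranging_boundary_node_list__py_alt (node_lt : List Int) (node_rt : List Int) (node_dn : List Int) (node_up : List Int) (delete_node : List Int) : List Int × List Int × List Int × List Int :=
  let th := delete_node.foldl
    (fun th d =>
      let t := insertT th d
      th.insertIdx (bs th t 0 th.length) t) []
  let fin := fun x => x - (bs th x 0 th.length : Int)
  (node_lt.map fin, node_rt.map fin, node_dn.map fin, node_up.map fin)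

-- ===== PRECONDITION & SPEC =====
def Spec_rearranging_boundary_node_list__py (node_lt : List Int) (node_rt : List Int) (node_dn : List Int) (node_up : List Int) (delete_node : List Int) (out : List Int × List Int × List Int × List Int) : Prop := out = rearranging_boundary_node_list__py_alt node_lt node_rt node_dn node_up delete_node
instance (node_lt : List Int) (node_rt : List Int) (node_dn : List Int) (node_up : List Int) (delete_node : List Int) (out : List Int × List Int × List Int × List Int) : Decidable (Spec_rearranging_boundary_node_list__py node_lt node_rt node_dn node_up delete_node out) := by unfold Spec_rearranging_boundary_node_list__py; infer_instance

-- ===== CLAIM (what is proved, stated in full; the proofs are below) =====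
def Claim_equal_rearranging_boundary_node_list__py : Prop := ∀ (node_lt : List Int) (node_rt : List Int) (node_dn : List Int) (node_up : List Int) (delete_node : List Int), Dom_rearranging_boundary_node_list__py node_lt node_rt node_dn node_up delete_node → Spec_rearranging_boundary_node_list__py node_lt node_rt node_dn node_up delete_node (rearranging_boundary_node_list__py node_lt node_rt node_dn node_up delete_node)

-- ===== LEMMAS AND PROOFS =====

-- number of elements of the list that are < x
def cntLt (x : Int) : List Int → Nat
  | [] => 0
  | s :: ss => (if s < x then 1 else 0) + cntLt x ss

lemma cntLt_le_length (x : Int) : ∀ th : List Int, cntLt x th ≤ th.length := by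
  intro th; induction th with
  | nil => simp [cntLt]
  | cons s ss ih => simp only [cntLt, List.length_cons]; split <;> omega

lemma cntLt_eq_zero (x : Int) : ∀ th : List Int, (∀ u ∈ th, ¬ u < x) → cntLt x th = 0 := by
  intro th; induction th with
  | nil => simp [cntLt]
  | cons s ss ih =>
    intro h
    have hs := h s (by simp)
    simp only [cntLt, if_neg hs, ih (fun u hu => h u (by simp [hu]))]

lemma cntLt_ge (x : Int) : ∀ (th : List Int), List.Pairwise (· < ·) th →
    ∀ (i : Nat) (h : i < th.length), th[i] < x → i + 1 ≤ cntLt x th := by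
  intro th; induction th with
  | nil => intro _ i h; simp at h
  | cons s ss ih =>
    intro hsort i h hx
    rcases List.pairwise_cons.mp hsort with ⟨hall, hss⟩
    cases i with
    | zero =>
      simp only [List.getElem_cons_zero] at hx
      simp only [cntLt, if_pos hx]; omega
    | succ j =>
      simp only [List.getElem_cons_succ] at hx
      have h1 : j + 1 ≤ cntLt x ss := ih hss j (by simpa using h) hx
      have hsx : s < x := lt_trans (hall _ (List.getElem_mem _)) hx
      simp only [cntLt, if_pos hsx]; omega

lemma cntLt_le (x : Int) : ∀ (th : List Int), List.Pairwise (· < ·) th →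
    ∀ (i : Nat) (h : i < th.length), ¬ th[i] < x → cntLt x th ≤ i := by
  intro th; induction th with
  | nil => intro _ i h; simp at h
  | cons s ss ih =>
    intro hsort i h hx
    rcases List.pairwise_cons.mp hsort with ⟨hall, hss⟩
    cases i with
    | zero =>
      simp only [List.getElem_cons_zero] at hx
      have hz : cntLt x ss = 0 := by
        apply cntLt_eq_zero
        intro u hu hux
        exact hx (lt_trans (hall u hu) hux)
      simp only [cntLt, if_neg hx, hz]; omega
    | succ j =>
      simp only [List.getElem_cons_succ] at hx
      have h1 : cntLt x ss ≤ j := ih hss j (by simpa using h) hx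
      simp only [cntLt]; split <;> omega

-- the binary search of Source B computes cntLt on a strictly sorted list
lemma bsGo_eq (x : Int) (th : List Int) (hsort : List.Pairwise (· < ·) th) :
    ∀ (fuel lo hi : Nat), hi - lo ≤ fuel → hi ≤ th.length → lo ≤ cntLt x th → cntLt x th ≤ hi →
    bsGo th x fuel lo hi = cntLt x th := by
  intro fuel
  induction fuel with
  | zero =>
    intro lo hi hf hhi hlo hchi
    simp only [bsGo]
    omega
  | succ fuel ih =>
    intro lo hi hf hhi hlo hchi
    simp only [bsGo]
    by_cases h : lo < hi
    · rw [if_pos h]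
      have hm : (lo + hi) / 2 < th.length := by omega
      show (if th.getD ((lo + hi) / 2) 0 < x then bsGo th x fuel ((lo + hi) / 2 + 1) hi
        else bsGo th x fuel lo ((lo + hi) / 2)) = cntLt x th
      rw [List.getD_eq_getElem th 0 hm]
      by_cases hlt : th[(lo + hi) / 2] < x
      · rw [if_pos hlt]
        exact ih _ _ (by omega) hhi (cntLt_ge x th hsort _ hm hlt) hchi
      · rw [if_neg hlt]
        exact ih _ _ (by omega) (by omega) hlo (cntLt_le x th hsort _ hm hlt)
    · rw [if_neg h]
      omega

lemma bs_eq (x : Int) (th : List Int) (hsort : List.Pairwise (· < ·) th) :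
    ∀ (lo hi : Nat), hi ≤ th.length → lo ≤ cntLt x th → cntLt x th ≤ hi →
    bs th x lo hi = cntLt x th := by
  intro lo hi hhi hlo hchi
  exact bsGo_eq x th hsort (hi - lo) lo hi le_rfl hhi hlo hchi

lemma insertT_ge : ∀ (th : List Int) (d : Int), d ≤ insertT th d := by
  intro th; induction th with
  | nil => intro d; simp [insertT]
  | cons s ss ih =>
    intro d
    simp only [insertT]
    split
    · have := ih (d + 1); omega
    · omega

-- the element inserted is never already in a strictly sorted th
lemma insertT_notMem : ∀ (th : List Int), List.Pairwise (· < ·) th →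
    ∀ (d u : Int), u ∈ th → insertT th d ≠ u := by
  intro th; induction th with
  | nil => intro _ d u hu; simp at hu
  | cons s ss ih =>
    intro hsort d u hu
    rcases List.pairwise_cons.mp hsort with ⟨hall, hss⟩
    simp only [insertT]
    split
    · rename_i hsd
      rcases List.mem_cons.mp hu with rfl | hu'
      · have := insertT_ge ss (d + 1); omega
      · exact ih hss (d + 1) u hu'
    · rename_i hds
      rcases List.mem_cons.mp hu with rfl | hu'
      · omega
      · have := hall u hu'; omega

-- when every threshold exceeds d, subtracting the count cannot cross d
lemma cnt_all_gt (x : Int) : ∀ (th : List Int), List.Pairwise (· < ·) th →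
    ∀ d : Int, (∀ u ∈ th, d < u) → (d < x - (cntLt x th : Int) ↔ d < x) := by
  intro th; induction th with
  | nil => intro _ d _; simp [cntLt]
  | cons s ss ih =>
    intro hsort d hgt
    rcases List.pairwise_cons.mp hsort with ⟨hall, hss⟩
    have hds : d < s := hgt s (by simp)
    simp only [cntLt]
    by_cases hsx : s < x
    · rw [if_pos hsx]
      have h1 : s < x - (cntLt x ss : Int) := (ih hss s hall).mpr hsx
      constructor <;> intro <;> [omega; (push_cast; omega)]
    · rw [if_neg hsx]
      have h2 := ih hss d (fun u hu => lt_trans hds (hall u hu))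
      simpa using h2

-- key characterisation: the new threshold t = insertT th d fires exactly when the
-- current value x - cntLt x th exceeds d
lemma insertT_spec : ∀ (th : List Int), List.Pairwise (· < ·) th →
    ∀ (d x : Int), (insertT th d < x ↔ d < x - (cntLt x th : Int)) := by
  intro th; induction th with
  | nil => intro _ d x; simp [insertT, cntLt]
  | cons s ss ih =>
    intro hsort d x
    rcases List.pairwise_cons.mp hsort with ⟨hall, hss⟩
    simp only [insertT, cntLt]
    split
    · rename_i hsd
      rw [ih hss (d + 1) x]
      by_cases hsx : s < x
      · rw [if_pos hsx]; push_cast; omega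
      · rw [if_neg hsx]
        have hnn : (0 : Int) ≤ (cntLt x ss : Int) := Int.natCast_nonneg _
        push_cast; omega
    · rename_i hds
      have h := cnt_all_gt x (s :: ss) hsort d
        (by intro u hu; rcases List.mem_cons.mp hu with rfl | hu'
            · omega
            · exact lt_trans (by omega) (hall u hu'))
      simp only [cntLt] at h
      exact h.symm

-- reference ordered insertion (what insertIdx at the bisect position amounts to)
def sIns : List Int → Int → List Int
  | [], t => [t]
  | s :: ss, t => if t ≤ s then t :: s :: ss else s :: sIns ss t

lemma mem_sIns : ∀ (th : List Int) (t u : Int), u ∈ sIns th t → u = t ∨ u ∈ th := by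
  intro th; induction th with
  | nil => intro t u hu; simpa [sIns] using hu
  | cons s ss ih =>
    intro t u hu
    simp only [sIns] at hu
    split at hu
    · rcases List.mem_cons.mp hu with rfl | h2
      · exact Or.inl rfl
      · exact Or.inr h2
    · rcases List.mem_cons.mp hu with rfl | h2
      · exact Or.inr (by simp)
      · rcases ih t u h2 with h3 | h3
        · exact Or.inl h3
        · exact Or.inr (by simp [h3])

lemma sorted_sIns : ∀ (th : List Int), List.Pairwise (· < ·) th →
    ∀ t : Int, t ∉ th → List.Pairwise (· < ·) (sIns th t) := by
  intro th; induction th with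
  | nil => intro _ t _; simp [sIns]
  | cons s ss ih =>
    intro hsort t hnm
    rcases List.pairwise_cons.mp hsort with ⟨hall, hss⟩
    have hts : t ≠ s := by intro h; exact hnm (by simp [h])
    have htss : t ∉ ss := fun h => hnm (by simp [h])
    simp only [sIns]
    split
    · rename_i hle
      refine List.pairwise_cons.mpr ⟨?_, hsort⟩
      intro u hu
      rcases List.mem_cons.mp hu with rfl | hu'
      · omega
      · have := hall u hu'; omega
    · rename_i hgt
      refine List.pairwise_cons.mpr ⟨?_, ih hss t htss⟩
      intro u hu
      rcases mem_sIns ss t u hu with rfl | hu'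
      · omega
      · exact hall u hu'
    
lemma cntLt_sIns (x : Int) : ∀ (th : List Int) (t : Int),
    cntLt x (sIns th t) = (if t < x then 1 else 0) + cntLt x th := by
  intro th; induction th with
  | nil => intro t; simp [sIns, cntLt]
  | cons s ss ih =>
    intro t
    simp only [sIns]
    split
    · simp only [cntLt]
    · simp only [cntLt, ih t]; omega

-- insertIdx at the bisect_left position on a strictly sorted list = ordered insertion
lemma insertIdx_cnt : ∀ (th : List Int), List.Pairwise (· < ·) th →
    ∀ t : Int, th.insertIdx (cntLt t th) t = sIns th t := by
  intro th; induction th with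
  | nil => intro _ t; simp [cntLt, sIns]
  | cons s ss ih =>
    intro hsort t
    rcases List.pairwise_cons.mp hsort with ⟨hall, hss⟩
    simp only [cntLt, sIns]
    by_cases hst : s < t
    · rw [if_pos hst, if_neg (by omega)]
      have : (1 + cntLt t ss) = (cntLt t ss) + 1 := by omega
      rw [this, List.insertIdx_succ_cons, ih hss t]
    · rw [if_neg hst, if_pos (by omega)]
      have hz : cntLt t ss = 0 := cntLt_eq_zero t ss
        (fun u hu hut => hst (lt_trans (hall u hu) hut))
      rw [hz]
      simp [List.insertIdx]

-- one build step of B equals ordered insertion of the new threshold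
lemma stepB_eq (th : List Int) (hsort : List.Pairwise (· < ·) th) (d : Int) :
    th.insertIdx (bs th (insertT th d) 0 th.length) (insertT th d) = sIns th (insertT th d) := by
  rw [bs_eq (insertT th d) th hsort 0 th.length le_rfl (Nat.zero_le _) (cntLt_le_length _ th)]
  exact insertIdx_cnt th hsort (insertT th d)

lemma stepB_sorted (th : List Int) (hsort : List.Pairwise (· < ·) th) (d : Int) :
    List.Pairwise (· < ·) (sIns th (insertT th d)) :=
  sorted_sIns th hsort (insertT th d)
    (fun h => insertT_notMem th hsort d (insertT th d) h rfl)

-- per-element agreement: folding A's conditional decrements over delete_node equals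
-- subtracting the count of B's thresholds
lemma fold_dec (x : Int) : ∀ (del : List Int) (th : List Int), List.Pairwise (· < ·) th →
    del.foldl (fun v d => if v > d then v - 1 else v) (x - (cntLt x th : Int)) =
    x - (cntLt x (del.foldl (fun th d =>
        let t := insertT th d
        th.insertIdx (bs th t 0 th.length) t) th) : Int) := by
  intro del; induction del with
  | nil => intro th _; simp
  | cons d ds ih =>
    intro th hsort
    simp only [List.foldl_cons]
    rw [stepB_eq th hsort d]
    have hiff := insertT_spec th hsort d x
    have hcnt := cntLt_sIns x th (insertT th d)
    have hstep : (if (x - (cntLt x th : Int)) > d then (x - (cntLt x th : Int)) - 1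
        else (x - (cntLt x th : Int))) = x - (cntLt x (sIns th (insertT th d)) : Int) := by
      rw [hcnt]
      by_cases htx : insertT th d < x
      · rw [if_pos (hiff.mp htx), if_pos htx]; push_cast; omega
      · rw [if_neg (fun hc => htx (hiff.mpr hc)), if_neg htx]; push_cast; omega
    rw [hstep, ih (sIns th (insertT th d)) (stepB_sorted th hsort d)]

-- A's delete-major double loop equals mapping the per-element fold over each list
lemma foldA_eq : ∀ (del lt rt dn up : List Int),
    del.foldl (fun st d =>
      (st.1.map (fun v => if v > d then v - 1 else v),
       st.2.1.map (fun v => if v > d then v - 1 else v),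
       st.2.2.1.map (fun v => if v > d then v - 1 else v),
       st.2.2.2.map (fun v => if v > d then v - 1 else v))) (lt, rt, dn, up) =
    (lt.map (fun x => del.foldl (fun v d => if v > d then v - 1 else v) x),
     rt.map (fun x => del.foldl (fun v d => if v > d then v - 1 else v) x),
     dn.map (fun x => del.foldl (fun v d => if v > d then v - 1 else v) x),
     up.map (fun x => del.foldl (fun v d => if v > d then v - 1 else v) x)) := by
  intro del; induction del with
  | nil => intro lt rt dn up; simp
  | cons d ds ih =>
    intro lt rt dn up
    simp only [List.foldl_cons]
    rw [ih]
    simp [List.map_map, Function.comp]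

-- ===== VERDICT (by name: the statement is the Claim_ definition above) =====
theorem rearranging_boundary_node_list__py_spec : Claim_equal_rearranging_boundary_node_list__py := by
  intro lt rt dn up del _
  unfold Spec_rearranging_boundary_node_list__py
  unfold rearranging_boundary_node_list__py rearranging_boundary_node_list__py_alt
  rw [foldA_eq]
  have hsorted : List.Pairwise (· < ·) ([] : List Int) := List.Pairwise.nil
  have hx : ∀ x : Int,
      del.foldl (fun v d => if v > d then v - 1 else v) x =
      x - (cntLt x (del.foldl (fun th d =>
        let t := insertT th d
        th.insertIdx (bs th t 0 th.length) t) []) : Int) := by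
    intro x
    have := fold_dec x del [] hsorted
    simpa [cntLt] using this
  have hbs : ∀ x : Int,
      x - (bs (del.foldl (fun th d =>
        let t := insertT th d
        th.insertIdx (bs th t 0 th.length) t) []) x 0
        (del.foldl (fun th d =>
        let t := insertT th d
        th.insertIdx (bs th t 0 th.length) t) []).length : Int) =
      x - (cntLt x (del.foldl (fun th d =>
        let t := insertT th d
        th.insertIdx (bs th t 0 th.length) t) []) : Int) := by
    intro x
    have hs : List.Pairwise (· < ·) (del.foldl (fun th d =>
        let t := insertT th d
        th.insertIdx (bs th t 0 th.length) t) []) := by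
      have : ∀ (l : List Int) (th : List Int), List.Pairwise (· < ·) th →
          List.Pairwise (· < ·) (l.foldl (fun th d =>
            let t := insertT th d
            th.insertIdx (bs th t 0 th.length) t) th) := by
        intro l; induction l with
        | nil => intro th h; simpa
        | cons d ds ihl =>
          intro th h
          simp only [List.foldl_cons]
          rw [stepB_eq th h d]
          exact ihl _ (stepB_sorted th h d)
      exact this del [] List.Pairwise.nil
    rw [bs_eq x _ hs 0 _ le_rfl (Nat.zero_le _) (cntLt_le_length _ _)]
  simp only []
  refine Prod.ext ?_ (Prod.ext ?_ (Prod.ext ?_ ?_)) <;>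
    simp only [] <;> exact List.map_congr_left (fun x _ => by rw [hx x, ← hbs x])
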